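-- pv_equiv track=rewrite | github.com/weissben2000/pretrain-data-prep | dataset_utils.py | apply_offset
-- ===== SOURCE A (Python) =====
-- def apply_offset(block, offset, pixel_array_sizeX, pixel_array_sizeY):
--     '''
--     Apply an offset to the per-time-stamp data from the entire pixel array
--         block (list): input data at a specific time stamp (2D)
--         offset (tuple): (x_offset, y_offset) to apply to the block
--         pixel_array_sizeX (int): size of the pixel array in X dimension
--         pixel_array_sizeY (int): size of the pixel array in Y dimension
--     '''
--     rows, cols = pixel_array_sizeY, pixel_array_sizeX
--     new_block = [[0 for _ in range(cols)] for _ in range(rows)]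
--
--     for i in range(rows):
--         for j in range(cols):
--             if block[i][j] != 0:
--                 new_i = i + offset[0]
--                 new_j = j + offset[1]
--                 if 0 <= new_i < rows and 0 <= new_j < cols:
--                     new_block[new_i][new_j] = block[i][j]
--     return new_block
-- ===== SOURCE B (Python) =====
-- def apply_offset(block, offset, pixel_array_sizeX, pixel_array_sizeY):
--     # Output-driven gather: build each destination cell directly by pulling
--     # from its (unique) source cell, instead of scattering sources into a
--     # pre-zeroed grid with per-cell nonzero/bounds guards.
--     rows, cols = pixel_array_sizeY, pixel_array_sizeX
--     oi, oj = offset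
--     return [
--         [block[di - oi][dj - oj]
--          if 0 <= di - oi < rows and 0 <= dj - oj < cols else 0
--          for dj in range(cols)]
--         for di in range(rows)]
-- ===== Notes on version B (the rewrite author's own statement) =====
-- stated objective: alternative
-- what changed: A scatters each nonzero source cell into a pre-zeroed grid with per-cell bounds/nonzero guards; B is a pure output-driven gather that builds each destination row by pulling its unique source value directly, with no mutation and no pre-zeroed grid.
import Mathlib
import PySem

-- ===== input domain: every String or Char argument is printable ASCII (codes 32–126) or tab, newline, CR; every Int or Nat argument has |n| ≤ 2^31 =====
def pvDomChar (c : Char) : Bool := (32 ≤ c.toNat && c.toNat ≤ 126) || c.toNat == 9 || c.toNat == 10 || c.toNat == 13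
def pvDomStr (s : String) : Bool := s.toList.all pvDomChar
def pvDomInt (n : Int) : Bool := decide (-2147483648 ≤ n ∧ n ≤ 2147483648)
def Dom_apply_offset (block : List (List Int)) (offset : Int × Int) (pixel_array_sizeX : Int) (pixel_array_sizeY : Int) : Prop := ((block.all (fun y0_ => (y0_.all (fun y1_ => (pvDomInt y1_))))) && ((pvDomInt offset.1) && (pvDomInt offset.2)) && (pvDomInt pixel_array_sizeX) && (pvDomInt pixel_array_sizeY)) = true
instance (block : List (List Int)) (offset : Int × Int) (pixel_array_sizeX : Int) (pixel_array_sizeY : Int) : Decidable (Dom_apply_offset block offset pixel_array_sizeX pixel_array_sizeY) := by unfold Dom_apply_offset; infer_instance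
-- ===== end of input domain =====

-- A scatters nonzero source cells into a pre-zeroed grid; B builds each destination cell by a pure gather from its unique source. Proved equal on all inputs where the Python A returns (Pre_ excludes only inputs where A raises IndexError).


-- ===== PORT A =====
-- Literal port of A: pre-zeroed rows×cols grid, then for each source cell (i,j),
-- if block[i][j] ≠ 0 and the shifted position is in range, write it there.
-- block[i][j] is pyGetD (exact under Pre_, which guarantees the indices are in range).
def apply_offset (block : List (List Int)) (offset : Int × Int) (pixel_array_sizeX : Int) (pixel_array_sizeY : Int) : List (List Int) :=
  let rows := pixel_array_sizeY
  let cols := pixel_array_sizeX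
  let new_block : List (List Int) :=
    (PySem.List.pyRange 0 rows 1).map (fun _ => (PySem.List.pyRange 0 cols 1).map (fun _ => (0 : Int)))
  (PySem.List.pyRange 0 rows 1).foldl (fun nb i =>
    (PySem.List.pyRange 0 cols 1).foldl (fun nb j =>
      if PySem.List.pyGetD (PySem.List.pyGetD block i []) j 0 ≠ 0 then
        let new_i := i + offset.1
        let new_j := j + offset.2
        if 0 ≤ new_i ∧ new_i < rows ∧ 0 ≤ new_j ∧ new_j < cols then
          PySem.List.pySetD nb new_i
            (PySem.List.pySetD (PySem.List.pyGetD nb new_i []) new_j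
              (PySem.List.pyGetD (PySem.List.pyGetD block i []) j 0))
        else nb
      else nb) nb) new_block

-- ===== PORT B =====
-- Literal port of B: pure gather, each destination cell pulls from its unique source.
def apply_offset_alt (block : List (List Int)) (offset : Int × Int) (pixel_array_sizeX : Int) (pixel_array_sizeY : Int) : List (List Int) :=
  let rows := pixel_array_sizeY
  let cols := pixel_array_sizeX
  let oi := offset.1
  let oj := offset.2
  (PySem.List.pyRange 0 rows 1).map (fun di =>
    (PySem.List.pyRange 0 cols 1).map (fun dj =>
      if 0 ≤ di - oi ∧ di - oi < rows ∧ 0 ≤ dj - oj ∧ dj - oj < cols then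
        PySem.List.pyGetD (PySem.List.pyGetD block (di - oi) []) (dj - oj) 0
      else 0))

-- ===== PRECONDITION & SPEC =====
-- Pre_ excludes exactly the inputs where Python A raises IndexError: when both loop
-- ranges are nonempty, block must have at least rows rows whose first rows rows each
-- have at least cols entries (A reads block[i][j] for every i<rows, j<cols).
def Pre_apply_offset (block : List (List Int)) (offset : Int × Int) (pixel_array_sizeX : Int) (pixel_array_sizeY : Int) : Prop :=
  pixel_array_sizeY ≤ 0 ∨ pixel_array_sizeX ≤ 0 ∨
    (pixel_array_sizeY ≤ (block.length : Int) ∧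
      ∀ r ∈ block.take pixel_array_sizeY.toNat, pixel_array_sizeX ≤ (r.length : Int))
instance (block : List (List Int)) (offset : Int × Int) (pixel_array_sizeX : Int) (pixel_array_sizeY : Int) : Decidable (Pre_apply_offset block offset pixel_array_sizeX pixel_array_sizeY) := by unfold Pre_apply_offset; infer_instance

def pvWitness_apply_offset : List (List Int) × (Int × Int) × Int × Int :=
  ([[1, 0], [0, 2]], (1, -1), 2, 2)

def Spec_apply_offset (block : List (List Int)) (offset : Int × Int) (pixel_array_sizeX : Int) (pixel_array_sizeY : Int) (out : List (List Int)) : Prop := out = apply_offset_alt block offset pixel_array_sizeX pixel_array_sizeY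
instance (block : List (List Int)) (offset : Int × Int) (pixel_array_sizeX : Int) (pixel_array_sizeY : Int) (out : List (List Int)) : Decidable (Spec_apply_offset block offset pixel_array_sizeX pixel_array_sizeY out) := by unfold Spec_apply_offset; infer_instance

-- ===== CLAIM (what is proved, stated in full; the proofs are below) =====
def Claim_equal_apply_offset : Prop := ∀ (block : List (List Int)) (offset : Int × Int) (pixel_array_sizeX : Int) (pixel_array_sizeY : Int), Dom_apply_offset block offset pixel_array_sizeX pixel_array_sizeY → Pre_apply_offset block offset pixel_array_sizeX pixel_array_sizeY → Spec_apply_offset block offset pixel_array_sizeX pixel_array_sizeY (apply_offset block offset pixel_array_sizeX pixel_array_sizeY)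

-- ===== LEMMAS AND PROOFS =====

def pvBlk (block : List (List Int)) (i j : Int) : Int :=
  PySem.List.pyGetD (PySem.List.pyGetD block i []) j 0

def pvF (block : List (List Int)) (oi oj rows cols di dj : Int) : Int :=
  if 0 ≤ di - oi ∧ di - oi < rows ∧ 0 ≤ dj - oj ∧ dj - oj < cols then
    pvBlk block (di - oi) (dj - oj)
  else 0

def pvGrid (rows cols : Int) (g : Int → Int → Int) : List (List Int) :=
  (PySem.List.pyRange 0 rows 1).map (fun di => (PySem.List.pyRange 0 cols 1).map (fun dj => g di dj))

def pvCell (block : List (List Int)) (oi oj rows cols i m di dj : Int) : Int :=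
  if di - oi < i ∨ (di - oi = i ∧ dj - oj < m) then pvF block oi oj rows cols di dj else 0

theorem pvGrid_congr {rows cols : Int} {g g' : Int → Int → Int}
    (h : ∀ di dj, 0 ≤ di → di < rows → 0 ≤ dj → dj < cols → g di dj = g' di dj) :
    pvGrid rows cols g = pvGrid rows cols g' := by
  unfold pvGrid
  apply List.map_congr_left
  intro di hdi
  have hb := (PySem.List.mem_pyRange_one).1 hdi
  apply List.map_congr_left
  intro dj hdj
  have hb' := (PySem.List.mem_pyRange_one).1 hdj
  exact h di dj hb.1 hb.2 hb'.1 hb'.2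

theorem pvGrid_set {rows cols : Int} {g : Int → Int → Int} {p q v : Int}
    (hp : 0 ≤ p) (hp2 : p < rows) (hq : 0 ≤ q) (_hq2 : q < cols) :
    PySem.List.pySetD (pvGrid rows cols g) p
      (PySem.List.pySetD (PySem.List.pyGetD (pvGrid rows cols g) p []) q v)
    = pvGrid rows cols (fun di dj => if di = p ∧ dj = q then v else g di dj) := by
  unfold pvGrid
  rw [PySem.List.pyGetD_map_pyRange_of_nonneg _ _ _ _ hp (by omega)]
  rw [PySem.List.pySetD_of_nonneg _ _ hq, PySem.List.pySetD_of_nonneg _ _ hp]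
  apply List.ext_getElem
  · simp
  · intro k h1 h2
    simp only [List.getElem_set, List.getElem_map, PySem.List.getElem_pyRange_one]
    by_cases hk : p.toNat = k
    · rw [if_pos hk]
      have hpk : (0:Int) + (k:Int) = p := by omega
      rw [hpk]
      apply List.ext_getElem
      · simp
      · intro m h3 h4
        simp only [List.getElem_set, List.getElem_map, PySem.List.getElem_pyRange_one]
        by_cases hm : q.toNat = m
        · rw [if_pos hm, if_pos (show True ∧ (0:Int) + (m:Int) = q from ⟨trivial, by omega⟩)]
        · rw [if_neg hm, if_neg (by rintro ⟨-, hc⟩; omega)]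
    · rw [if_neg hk]
      apply List.map_congr_left
      intro dj _
      rw [if_neg (by omega)]

theorem pvInner (block : List (List Int)) (oi oj rows cols i : Int)
    (hi : 0 ≤ i) (hi2 : i < rows) :
    ∀ (n : Nat) (j : Int), 0 ≤ j → (cols - j).toNat = n →
    (PySem.List.pyRange j cols 1).foldl (fun nb j =>
      if PySem.List.pyGetD (PySem.List.pyGetD block i []) j 0 ≠ 0 then
        if 0 ≤ i + oi ∧ i + oi < rows ∧ 0 ≤ j + oj ∧ j + oj < cols then
          PySem.List.pySetD nb (i + oi)
            (PySem.List.pySetD (PySem.List.pyGetD nb (i + oi) []) (j + oj)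
              (PySem.List.pyGetD (PySem.List.pyGetD block i []) j 0))
        else nb
      else nb) (pvGrid rows cols (pvCell block oi oj rows cols i j))
    = pvGrid rows cols (pvCell block oi oj rows cols i cols) := by
  intro n
  induction n with
  | zero =>
    intro j hj hn
    rw [PySem.List.pyRange_one_eq_nil (show cols ≤ j by omega)]
    simp only [List.foldl_nil]
    apply pvGrid_congr
    intro di dj h1 h2 h3 h4
    unfold pvCell pvF
    split_ifs <;> first | rfl | omega
  | succ n ih =>
    intro j hj hn
    rw [PySem.List.pyRange_one_cons (by omega : j < cols)]
    simp only [List.foldl_cons]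
    have hstep :
        (if PySem.List.pyGetD (PySem.List.pyGetD block i []) j 0 ≠ 0 then
          if 0 ≤ i + oi ∧ i + oi < rows ∧ 0 ≤ j + oj ∧ j + oj < cols then
            PySem.List.pySetD (pvGrid rows cols (pvCell block oi oj rows cols i j)) (i + oi)
              (PySem.List.pySetD (PySem.List.pyGetD (pvGrid rows cols (pvCell block oi oj rows cols i j)) (i + oi) []) (j + oj)
                (PySem.List.pyGetD (PySem.List.pyGetD block i []) j 0))
          else pvGrid rows cols (pvCell block oi oj rows cols i j)
        else pvGrid rows cols (pvCell block oi oj rows cols i j))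
        = pvGrid rows cols (pvCell block oi oj rows cols i (j + 1)) := by
      by_cases hv : PySem.List.pyGetD (PySem.List.pyGetD block i []) j 0 = 0
      · rw [if_neg (not_not_intro hv)]
        apply pvGrid_congr
        intro di dj h1 h2 h3 h4
        unfold pvCell pvF
        split_ifs <;> first
          | rfl | (exfalso; omega)
          | (have e1 : di - oi = i := by omega
             have e2 : dj - oj = j := by omega
             rw [pvBlk, e1, e2]
             first | exact hv | exact hv.symm)
      · rw [if_pos hv]
        by_cases hin : 0 ≤ i + oi ∧ i + oi < rows ∧ 0 ≤ j + oj ∧ j + oj < cols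
        · rw [if_pos hin]
          rw [pvGrid_set hin.1 hin.2.1 hin.2.2.1 hin.2.2.2]
          apply pvGrid_congr
          intro di dj h1 h2 h3 h4
          unfold pvCell pvF
          split_ifs <;> first
            | rfl | (exfalso; omega)
            | (have e1 : di - oi = i := by omega
               have e2 : dj - oj = j := by omega
               rw [pvBlk, e1, e2])
        · rw [if_neg hin]
          apply pvGrid_congr
          intro di dj h1 h2 h3 h4
          unfold pvCell pvF
          split_ifs <;> first | rfl | omega
    rw [hstep]
    exact ih (j + 1) (by omega) (by omega)

theorem pvOuter (block : List (List Int)) (oi oj rows cols : Int) :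
    ∀ (n : Nat) (i : Int), 0 ≤ i → (rows - i).toNat = n →
    (PySem.List.pyRange i rows 1).foldl (fun nb i =>
      (PySem.List.pyRange 0 cols 1).foldl (fun nb j =>
        if PySem.List.pyGetD (PySem.List.pyGetD block i []) j 0 ≠ 0 then
          if 0 ≤ i + oi ∧ i + oi < rows ∧ 0 ≤ j + oj ∧ j + oj < cols then
            PySem.List.pySetD nb (i + oi)
              (PySem.List.pySetD (PySem.List.pyGetD nb (i + oi) []) (j + oj)
                (PySem.List.pyGetD (PySem.List.pyGetD block i []) j 0))
          else nb
        else nb) nb) (pvGrid rows cols (pvCell block oi oj rows cols i 0))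
    = pvGrid rows cols (pvCell block oi oj rows cols rows 0) := by
  intro n
  induction n with
  | zero =>
    intro i hi hn
    rw [PySem.List.pyRange_one_eq_nil (show rows ≤ i by omega)]
    simp only [List.foldl_nil]
    apply pvGrid_congr
    intro di dj h1 h2 h3 h4
    unfold pvCell pvF
    split_ifs <;> first | rfl | omega
  | succ n ih =>
    intro i hi hn
    rw [PySem.List.pyRange_one_cons (by omega : i < rows)]
    simp only [List.foldl_cons]
    have hstep :
        (PySem.List.pyRange 0 cols 1).foldl (fun nb j =>
          if PySem.List.pyGetD (PySem.List.pyGetD block i []) j 0 ≠ 0 then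
            if 0 ≤ i + oi ∧ i + oi < rows ∧ 0 ≤ j + oj ∧ j + oj < cols then
              PySem.List.pySetD nb (i + oi)
                (PySem.List.pySetD (PySem.List.pyGetD nb (i + oi) []) (j + oj)
                  (PySem.List.pyGetD (PySem.List.pyGetD block i []) j 0))
            else nb
          else nb) (pvGrid rows cols (pvCell block oi oj rows cols i 0))
        = pvGrid rows cols (pvCell block oi oj rows cols (i + 1) 0) := by
      by_cases hc : 0 ≤ cols
      · rw [pvInner block oi oj rows cols i hi (by omega) cols.toNat 0 le_rfl (by omega)]
        apply pvGrid_congr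
        intro di dj h1 h2 h3 h4
        unfold pvCell pvF
        split_ifs <;> first | rfl | omega
      · rw [PySem.List.pyRange_one_eq_nil (by omega : cols ≤ 0)]
        simp only [List.foldl_nil]
        apply pvGrid_congr
        intro di dj h1 h2 h3 h4
        exact absurd h4 (by omega)
    rw [hstep]
    exact ih (i + 1) (by omega) (by omega)

theorem pvMain (block : List (List Int)) (offset : Int × Int) (X Y : Int) :
    apply_offset block offset X Y = apply_offset_alt block offset X Y := by
  unfold apply_offset apply_offset_alt
  dsimp only
  have h0 : (PySem.List.pyRange 0 Y 1).map (fun _ => (PySem.List.pyRange 0 X 1).map (fun _ => (0 : Int)))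
      = pvGrid Y X (pvCell block offset.1 offset.2 Y X 0 0) := by
    have : (PySem.List.pyRange 0 Y 1).map (fun _ => (PySem.List.pyRange 0 X 1).map (fun _ => (0 : Int)))
        = pvGrid Y X (fun _ _ => 0) := rfl
    rw [this]
    apply pvGrid_congr
    intro di dj h1 h2 h3 h4
    unfold pvCell pvF
    split_ifs <;> first | rfl | omega
  rw [h0]
  rw [pvOuter block offset.1 offset.2 Y X Y.toNat 0 le_rfl (by omega)]
  have hB : (PySem.List.pyRange 0 Y 1).map (fun di =>
      (PySem.List.pyRange 0 X 1).map (fun dj =>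
        if 0 ≤ di - offset.1 ∧ di - offset.1 < Y ∧ 0 ≤ dj - offset.2 ∧ dj - offset.2 < X then
          PySem.List.pyGetD (PySem.List.pyGetD block (di - offset.1) []) (dj - offset.2) 0
        else 0))
      = pvGrid Y X (fun di dj => pvF block offset.1 offset.2 Y X di dj) := rfl
  rw [hB]
  apply pvGrid_congr
  intro di dj h1 h2 h3 h4
  unfold pvCell pvF
  split_ifs <;> first | rfl | omega

-- ===== VERDICT (by name: the statement is the Claim_ definition above) =====
theorem apply_offset_spec : Claim_equal_apply_offset := by
  intro block offset X Y _ _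
  unfold Spec_apply_offset
  exact pvMain block offset X Y
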